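-- pv_equiv track=rewrite | github.com/Pazificateur69/NightOwl | benchmarks/summary.py | latest_results_by_target
-- ===== SOURCE A (Python) =====
-- def latest_results_by_target(results: list[dict]) -> list[dict]:
--     latest: dict[str, dict] = {}
--     for result in results:
--         target = result.get("target_name", "unknown")
--         started_at = result.get("started_at", "")
--         if target not in latest or started_at > latest[target].get("started_at", ""):
--             latest[target] = result
--     return [latest[name] for name in sorted(latest)]
-- ===== SOURCE B (Python) =====
-- def latest_results_by_target(results: list[dict]) -> list[dict]:
--     names = sorted({r.get("target_name", "unknown") for r in results})
--     out = []
--     for name in names: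
--         best = None
--         for r in results:
--             if r.get("target_name", "unknown") != name:
--                 continue
--             if best is None or r.get("started_at", "") > best.get("started_at", ""):
--                 best = r
--         out.append(best)
--     return out
-- ===== Notes on version B (the rewrite author's own statement) =====
-- stated objective: alternative
-- what changed: Replaces the running dict of latest-per-target plus final key sort with: collect the distinct target names, sort them, then rescan the results once per name to pick its latest entry (strict >, first wins).
import Mathlib
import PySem

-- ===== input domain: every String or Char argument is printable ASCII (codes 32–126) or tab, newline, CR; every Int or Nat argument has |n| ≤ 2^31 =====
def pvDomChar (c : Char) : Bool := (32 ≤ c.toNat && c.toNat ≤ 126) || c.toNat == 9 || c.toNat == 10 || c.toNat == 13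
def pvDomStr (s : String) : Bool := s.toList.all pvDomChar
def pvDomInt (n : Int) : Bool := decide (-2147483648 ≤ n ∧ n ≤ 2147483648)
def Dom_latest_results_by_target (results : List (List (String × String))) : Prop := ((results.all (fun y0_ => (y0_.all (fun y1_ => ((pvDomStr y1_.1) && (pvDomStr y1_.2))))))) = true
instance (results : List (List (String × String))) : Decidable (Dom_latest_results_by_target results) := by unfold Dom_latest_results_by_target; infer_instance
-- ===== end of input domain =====

-- B replaces A's running dict + final key sort by sorting the distinct target names and
-- rescanning the results once per name for its latest entry (alternative decomposition, not faster).

-- shared primitive: r.get(k, dflt) on an input dict given as an association list (first match)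
def pvGet (r : List (String × String)) (k dflt : String) : String :=
  (PySem.Dict.mk r).getD k dflt

-- ===== PORT A =====
-- loop body of A's 'for result in results'
def pvStepA (d : PySem.Dict String (List (String × String))) (r : List (String × String)) :
    PySem.Dict String (List (String × String)) :=
  let target := pvGet r "target_name" "unknown"
  let started_at := pvGet r "started_at" ""
  if d.contains target = false ∨ pvGet (d.getD target []) "started_at" "" < started_at
  then d.insert target r else d

def latest_results_by_target (results : List (List (String × String))) : List (List (String × String)) :=
  let latest := results.foldl pvStepA PySem.Dict.empty
  -- latest[name]: name ranges over latest's keys, so the getD default [] is never returned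
  (PySem.List.sorted latest.keys (fun x => x) false).map (fun name => latest.getD name [])

-- ===== PORT B =====
-- loop body of Source B's inner 'for r in results'
def pvStepB (name : String) (best : Option (List (String × String))) (r : List (String × String)) :
    Option (List (String × String)) :=
  if pvGet r "target_name" "unknown" ≠ name then best
  else if best.isNone = true ∨ pvGet (best.getD []) "started_at" "" < pvGet r "started_at" ""
  then some r else best

def latest_results_by_target_alt (results : List (List (String × String))) : List (List (String × String)) :=
  let names := PySem.List.sorted
    (PySem.Set.ofList (results.map (fun r => pvGet r "target_name" "unknown"))) (fun x => x) false
  -- best is never None once name came from the results, so the getD default [] is never returned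
  names.foldl (fun out name => out ++ [(results.foldl (pvStepB name) none).getD []]) []

-- ===== PRECONDITION & SPEC =====
def Spec_latest_results_by_target (results : List (List (String × String))) (out : List (List (String × String))) : Prop := out = latest_results_by_target_alt results
instance (results : List (List (String × String))) (out : List (List (String × String))) : Decidable (Spec_latest_results_by_target results out) := by unfold Spec_latest_results_by_target; infer_instance

-- ===== CLAIM (what is proved, stated in full; the proofs are below) =====
def Claim_equal_latest_results_by_target : Prop := ∀ (results : List (List (String × String))), Dom_latest_results_by_target results → Spec_latest_results_by_target results (latest_results_by_target results)

-- ===== LEMMAS AND PROOFS =====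

-- the lookup at t of A's dict fold is B's best-so-far fold at name t
theorem get?_foldl_stepA (xs : List (List (String × String)))
    (d : PySem.Dict String (List (String × String))) (t : String) :
    (xs.foldl pvStepA d).get? t = xs.foldl (pvStepB t) (d.get? t) := by
  induction xs generalizing d with
  | nil => rfl
  | cons r xs ih =>
    simp only [List.foldl_cons]
    rw [ih]
    congr 1
    unfold pvStepA pvStepB
    by_cases hk : pvGet r "target_name" "unknown" = t
    · rw [hk]
      cases h : d.get? t with
      | none =>
        have hc : d.contains t = false := (PySem.Dict.get?_eq_none_iff_contains d t).mp h
        simp [hc, PySem.Dict.get?_insert_self]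
      | some b =>
        have hc : d.contains t = true := by
          rcases (PySem.Dict.get?_eq_none_iff_contains d t) with ⟨h1, h2⟩
          cases hcc : d.contains t with
          | true => rfl
          | false => rw [h2 hcc] at h; cases h
        have hgd : d.getD t [] = b := by
          simp [PySem.Dict.getD_eq_get?_getD, h]
        simp only [hc, hgd, Option.getD_some, Option.isNone_some]
        by_cases hlt : pvGet b "started_at" "" < pvGet r "started_at" ""
        · simp [hlt, PySem.Dict.get?_insert_self]
        · simp [hlt, h]
    · simp only [if_pos (by simpa using hk)]
      split_ifs with hcond
      · exact PySem.Dict.get?_insert_of_ne d r (fun h => hk h.symm)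
      · rfl
  
-- the keys of A's dict fold are the set of target names (first-occurrence order)
theorem keys_foldl_stepA (xs : List (List (String × String)))
    (d : PySem.Dict String (List (String × String))) :
    (xs.foldl pvStepA d).keys =
      (xs.map (fun r => pvGet r "target_name" "unknown")).foldl PySem.Set.add d.keys := by
  induction xs generalizing d with
  | nil => rfl
  | cons r xs ih =>
    simp only [List.foldl_cons, List.map_cons]
    rw [ih]
    congr 1
    unfold pvStepA
    cases hc : d.contains (pvGet r "target_name" "unknown") with
    | false =>
      have hnm : pvGet r "target_name" "unknown" ∉ d.keys := fun hm =>
        by rw [(PySem.Dict.contains_iff_mem_keys d _).mpr hm] at hc; cases hc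
      simp only [hc]
      rw [if_pos (Or.inl trivial), PySem.Dict.keys_insert_of_not_contains d r hc,
        PySem.Set.add_of_not_mem hnm]
    | true =>
      have hm : pvGet r "target_name" "unknown" ∈ d.keys :=
        (PySem.Dict.contains_iff_mem_keys d _).mp hc
      rw [PySem.Set.add_of_mem hm]
      simp only
      split_ifs with hcond
      · exact PySem.Dict.keys_insert_of_contains d r hc
      · rfl

-- ===== VERDICT (by name: the statement is the Claim_ definition above) =====
theorem latest_results_by_target_spec : Claim_equal_latest_results_by_target := by
  intro results _
  unfold Spec_latest_results_by_target latest_results_by_target latest_results_by_target_alt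
  simp only [PySem.List.foldl_append_singleton_eq_map, List.nil_append]
  have hkeys : (results.foldl pvStepA PySem.Dict.empty).keys =
      PySem.Set.ofList (results.map (fun r => pvGet r "target_name" "unknown")) := by
    rw [keys_foldl_stepA, PySem.Set.ofList_eq_foldl]
    rfl
  rw [hkeys]
  apply List.map_congr_left
  intro name _
  rw [PySem.Dict.getD_eq_get?_getD, get?_foldl_stepA]
  rfl
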